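-- pv_equiv track=rewrite | github.com/pepebonet/nano_damage | scripts/enrichment.py | order_muts_pentamers
-- ===== SOURCE A (Python) =====
-- base = ['A', 'C', 'G', 'T']
--
-- def order_muts_pentamers(cent=None):
--     total = []
--     if cent:
--         for f in base:
--                 for s in base:
--                     for four in base:
--                         for last in base:
--                             a = '{}{}{}{}{}'.format(f, s, cent, four, last)
--                             total.append(a)
--     else:
--         for ref in base:
--                 for f in base:
--                     for s in base:
--                         for four in base:
--                             for last in base:
--                                 a = '{}{}{}{}{}'.format(f, s, ref, four, last)
--                                 total.append(a)
--
--     return total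
-- ===== SOURCE B (Python) =====
-- base = ['A', 'C', 'G', 'T']
--
-- def order_muts_pentamers(cent=None):
--     if cent:
--         return [f + s + cent + four + last
--                 for f in base for s in base for four in base for last in base]
--     return [p for ref in base for p in order_muts_pentamers(ref)]
-- ===== Notes on version B (the rewrite author's own statement) =====
-- stated objective: simpler
-- what changed: B keeps one enumeration body (a comprehension) for a truthy center and handles the None/empty case by recursively concatenating order_muts_pentamers(ref) over the four bases, instead of duplicating the five nested loops.
import Mathlib
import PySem

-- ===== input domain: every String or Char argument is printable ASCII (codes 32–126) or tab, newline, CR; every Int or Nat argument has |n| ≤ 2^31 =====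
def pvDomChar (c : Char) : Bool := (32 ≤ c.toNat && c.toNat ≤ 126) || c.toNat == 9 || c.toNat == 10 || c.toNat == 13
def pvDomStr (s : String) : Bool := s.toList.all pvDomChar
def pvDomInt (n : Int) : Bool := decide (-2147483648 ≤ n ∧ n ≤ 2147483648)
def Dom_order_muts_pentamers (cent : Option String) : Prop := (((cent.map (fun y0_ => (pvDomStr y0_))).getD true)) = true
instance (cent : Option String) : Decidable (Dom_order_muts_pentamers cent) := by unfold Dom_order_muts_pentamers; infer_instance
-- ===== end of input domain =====

-- B folds A's duplicated else-branch loop nest into a recursive call over the four bases; objective: simpler.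

def pvBase : List String := ["A", "C", "G", "T"]

-- ===== PORT A =====
-- Literal port: two five-deep loop nests appending to `total`; `if cent:` is Python truthiness.
def order_muts_pentamers (cent : Option String) : List String :=
  match cent with
  | some c =>
    if c ≠ "" then
      pvBase.foldl (fun total f =>
        pvBase.foldl (fun total s =>
          pvBase.foldl (fun total four =>
            pvBase.foldl (fun total last =>
              total ++ [f ++ s ++ c ++ four ++ last]) total) total) total) []
    else
      pvBase.foldl (fun total ref =>
        pvBase.foldl (fun total f =>
          pvBase.foldl (fun total s =>
            pvBase.foldl (fun total four =>
              pvBase.foldl (fun total last =>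
                total ++ [f ++ s ++ ref ++ four ++ last]) total) total) total) total) []
  | none =>
      pvBase.foldl (fun total ref =>
        pvBase.foldl (fun total f =>
          pvBase.foldl (fun total s =>
            pvBase.foldl (fun total four =>
              pvBase.foldl (fun total last =>
                total ++ [f ++ s ++ ref ++ four ++ last]) total) total) total) total) []

-- ===== PORT B =====
-- Port of Source B; `attach` only supplies the membership fact needed for termination of the recursion.
def order_muts_pentamers_alt (cent : Option String) : List String :=
  match cent with
  | some c =>
    if c ≠ "" then
      pvBase.flatMap fun f => pvBase.flatMap fun s =>
        pvBase.flatMap fun four => pvBase.map fun last =>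
          f ++ s ++ c ++ four ++ last
    else
      pvBase.attach.flatMap fun r => order_muts_pentamers_alt (some r.1)
  | none =>
      pvBase.attach.flatMap fun r => order_muts_pentamers_alt (some r.1)
termination_by (match cent with | some c => if c = "" then 1 else 0 | none => 1)
decreasing_by
  all_goals
    rcases r with ⟨r, hr⟩
    simp only [pvBase, List.mem_cons, List.not_mem_nil, or_false] at hr
    rcases hr with rfl | rfl | rfl | rfl <;> simp_all

-- ===== PRECONDITION & SPEC =====
def Spec_order_muts_pentamers (cent : Option String) (out : List String) : Prop := out = order_muts_pentamers_alt cent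
instance (cent : Option String) (out : List String) : Decidable (Spec_order_muts_pentamers cent out) := by unfold Spec_order_muts_pentamers; infer_instance

-- ===== CLAIM (what is proved, stated in full; the proofs are below) =====
def Claim_equal_order_muts_pentamers : Prop := ∀ (cent : Option String), Dom_order_muts_pentamers cent → Spec_order_muts_pentamers cent (order_muts_pentamers cent)

-- ===== LEMMAS AND PROOFS =====

-- The pentamers produced for a fixed center c, in B's (= both loop nests') order.
def pvE (c : String) : List String :=
  pvBase.flatMap fun f => pvBase.flatMap fun s =>
    pvBase.flatMap fun four => pvBase.map fun last => f ++ s ++ c ++ four ++ last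

-- The four-deep append loop nest for center c equals acc ++ pvE c.
theorem pv_nest (c : String) (acc : List String) :
    (pvBase.foldl (fun total f =>
       pvBase.foldl (fun total s =>
         pvBase.foldl (fun total four =>
           pvBase.foldl (fun total last =>
             total ++ [f ++ s ++ c ++ four ++ last]) total) total) total) acc)
    = acc ++ pvE c := by
  simp only [pvE, PySem.List.foldl_append_singleton_eq_map, PySem.List.foldl_append_eq_flatMap]

theorem pv_A_some (c : String) (hc : c ≠ "") :
    order_muts_pentamers (some c) = pvE c := by
  rw [order_muts_pentamers, if_pos hc]
  simpa using pv_nest c []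

theorem pv_A_else :
    order_muts_pentamers none = pvBase.flatMap pvE := by
  rw [order_muts_pentamers]
  have h : ∀ acc : List String,
      (pvBase.foldl (fun total ref =>
        pvBase.foldl (fun total f =>
          pvBase.foldl (fun total s =>
            pvBase.foldl (fun total four =>
              pvBase.foldl (fun total last =>
                total ++ [f ++ s ++ ref ++ four ++ last]) total) total) total) total) acc)
      = acc ++ pvBase.flatMap pvE := by
    intro acc
    have hb : ∀ (total : List String) (ref : String),
        (pvBase.foldl (fun total f =>
          pvBase.foldl (fun total s =>
            pvBase.foldl (fun total four =>
              pvBase.foldl (fun total last =>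
                total ++ [f ++ s ++ ref ++ four ++ last]) total) total) total) total)
        = total ++ pvE ref := fun total ref => pv_nest ref total
    simp only [hb]
    simp only [PySem.List.foldl_append_eq_flatMap]
  simpa using h []

theorem pv_alt_some (c : String) (hc : c ≠ "") :
    order_muts_pentamers_alt (some c) = pvE c := by
  rw [order_muts_pentamers_alt, if_pos hc, pvE]

theorem pv_alt_else :
    (pvBase.attach.flatMap fun r => order_muts_pentamers_alt (some r.1))
      = pvBase.flatMap pvE := by
  have h1 : (pvBase.attach.flatMap fun r => order_muts_pentamers_alt (some r.1))
      = pvBase.flatMap fun c => order_muts_pentamers_alt (some c) := by simp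
  rw [h1]
  refine List.flatMap_congr ?_
  intro c hc
  refine pv_alt_some c ?_
  simp only [pvBase, List.mem_cons, List.not_mem_nil, or_false] at hc
  rcases hc with rfl | rfl | rfl | rfl <;> decide

-- ===== VERDICT (by name: the statement is the Claim_ definition above) =====
theorem order_muts_pentamers_spec : Claim_equal_order_muts_pentamers := by
  intro cent _
  unfold Spec_order_muts_pentamers
  match cent with
  | none =>
    rw [order_muts_pentamers_alt, pv_alt_else, pv_A_else]
  | some c =>
    by_cases hc : c = ""
    · subst hc
      rw [order_muts_pentamers_alt, if_neg (by decide), pv_alt_else]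
      rw [show order_muts_pentamers (some "") = order_muts_pentamers none from by
        rw [order_muts_pentamers, order_muts_pentamers, if_neg (by decide)]]
      exact pv_A_else
    · rw [pv_A_some c hc, pv_alt_some c hc]
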